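-- pv_equiv track=rewrite | github.com/cnrmck/static_spines | old_files/spiney_old.py | orders_for_n
-- ===== SOURCE A (Python) =====
-- def orders_for_n(n, b):
--     """
--     this function returns a tuple of b^(order) + b^(order) + ... + b^(order)
--     that sum to variable n
--     it's essentially the same as converting to a base, but instead of a value
--     represented by numbers, the symbol index is listed however many times it
--     ought to show up
--     e.g.
--
--     look what happens when we try 20 in base 10, we get 2 '1's back
--     this is because in index 1 we want a symbol to represent the value 2
--     there are no '0's, so in index 0 we want a symbol for 0
--     i.e. the symbol '2' in index 1, '0' in index 0 solution: "20"
--     >>> orders_for_n(20, 10)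
--     (1, 1)
--
--     10 in base 10 returns a tuple with only '1' in it
--     this is because index 1 should have a symbol representing the value "1"
--     there are no '0's, so we need a symbol for the value "0" in the 0 index
--     i.e. 1 in index 1, 0 in index 0 solution: "10"
--     >>> orders_for_n(10, 10)
--     (1,)
--
--     for 9 in base 10 we get 9 '0's back.
--     this is because index 0 wants a symbol for the value 9 solution: "9"
--     >>> orders_for_n(9, 10)
--     (0, 0, 0, 0, 0, 0, 0, 0, 0)
--
--     for 2 in base 2, it's easy. we get 1 '1' back and no '0's
--     therefore we just need a symbol for '1' in index 1 and '0' in index 0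
--     the solution: "10"
--     >>> orders_for_n(2, 2)
--     (1,)
--
--     now we can go faster. got back 1 '0', therefore: "1"
--     >>> orders_for_n(1, 2)
--     (0,)
--
--     just for fun: got back 1 '8', 1 '7', 1 '6', 1 '5', 1 '4', and 1 '2'
--     therefore: "111110100"
--     notice that indices 0, 1, and 3 have 0s because they didn't show up
--     >>> orders_for_n(500, 2)
--     (2, 4, 5, 6, 7, 8)
--
--     Note that the order of output is reversed
--     """
--     orders = []
--     while n > 0:
--         order = 0
--         while n % b**(order+1) != n:
--             order += 1
--
--         orders.append(order)
--         n -= b**order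
--     try:
--         orders.reverse()
--     except TypeError:
--         pass
--
--     return tuple(orders)
-- ===== SOURCE B (Python) =====
-- def orders_for_n(n, b):
--     out = []
--     order = 0
--     while n > 0:
--         n, d = divmod(n, b)
--         out.extend([order] * d)
--         order += 1
--     return tuple(out)
-- ===== Notes on version B (the rewrite author's own statement) =====
-- stated objective: faster
-- what changed: B extracts base-b digits in one ascending divmod pass and emits each order i digit_i times, instead of A's repeated subtraction of the largest power with an inner loop re-finding that power from scratch each time.
import Mathlib
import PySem

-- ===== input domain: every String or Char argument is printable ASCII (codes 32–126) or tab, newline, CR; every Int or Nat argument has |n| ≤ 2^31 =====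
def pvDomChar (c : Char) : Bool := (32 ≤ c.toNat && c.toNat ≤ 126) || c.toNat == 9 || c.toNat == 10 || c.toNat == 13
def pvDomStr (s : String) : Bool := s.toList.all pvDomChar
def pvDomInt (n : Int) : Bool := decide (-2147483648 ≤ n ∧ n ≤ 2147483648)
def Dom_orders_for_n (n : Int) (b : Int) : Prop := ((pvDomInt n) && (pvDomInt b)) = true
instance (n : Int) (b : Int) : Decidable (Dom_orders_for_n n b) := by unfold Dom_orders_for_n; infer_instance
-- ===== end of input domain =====

-- B replaces A's peel-off-the-largest-power loop (inner loop re-finding the top power each round)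
-- by a single ascending divmod digit expansion; measurably faster (asymptotic mechanism).

-- ===== PORT A =====
-- inner loop: `order = 0; while n % b**(order+1) != n: order += 1`
-- (fuel makes the loop total; inside Pre_ the fuel n.toNat always suffices)
def ordersInner (n b : Int) : Nat → Nat → Nat
  | 0, order => order
  | f + 1, order =>
      if PySem.Int.mod n (b ^ (order + 1)) ≠ n then ordersInner n b f (order + 1) else order

-- outer loop: `while n > 0: ... orders.append(order); n -= b**order`
def ordersOuter (b : Int) : Nat → Int → List Int → List Int
  | 0, _, orders => orders
  | f + 1, n, orders =>
      if n > 0 then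
        let order := ordersInner n b n.toNat 0
        ordersOuter b f (n - b ^ order) (orders ++ [(order : Int)])
      else orders

def orders_for_n (n : Int) (b : Int) : List Int :=
  (ordersOuter b n.toNat n []).reverse

-- ===== PORT B =====
-- `while n > 0: n, d = divmod(n, b); out.extend([order]*d); order += 1`
def altLoop (b : Int) : Nat → Int → Int → List Int → List Int
  | 0, _, _, out => out
  | f + 1, n, order, out =>
      if n > 0 then
        let q := PySem.Int.floordiv n b   -- divmod(n, b)
        let d := PySem.Int.mod n b
        altLoop b f q (order + 1) (out ++ List.replicate d.toNat order)
      else out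

def orders_for_n_alt (n : Int) (b : Int) : List Int :=
  altLoop b n.toNat n 0 []

-- ===== PRECONDITION & SPEC =====
-- A diverges for n > 0 unless b ≥ 2 (inner loop never terminates for b ≤ 1 or b < 0)
-- and raises ZeroDivisionError for n > 0, b = 0; for n ≤ 0 it returns () for any b.
def Pre_orders_for_n (n : Int) (b : Int) : Prop := n ≤ 0 ∨ 2 ≤ b
instance (n : Int) (b : Int) : Decidable (Pre_orders_for_n n b) := by
  unfold Pre_orders_for_n; infer_instance
def pvWitness_orders_for_n : Int × Int := (500, 2)

def Spec_orders_for_n (n : Int) (b : Int) (out : List Int) : Prop := out = orders_for_n_alt n b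
instance (n : Int) (b : Int) (out : List Int) : Decidable (Spec_orders_for_n n b out) := by
  unfold Spec_orders_for_n; infer_instance

-- ===== CLAIM (what is proved, stated in full; the proofs are below) =====
def Claim_equal_orders_for_n : Prop := ∀ (n : Int) (b : Int), Dom_orders_for_n n b → Pre_orders_for_n n b → Spec_orders_for_n n b (orders_for_n n b)

-- ===== LEMMAS AND PROOFS =====

-- the common mathematical value: each base-b order i is listed (digit i of n) times, ascending
def digitSpec (b : Nat) (n : Nat) (ord : Int) : List Int :=
  if _h : n = 0 ∨ b ≤ 1 then []
  else List.replicate (n % b) ord ++ digitSpec b (n / b) (ord + 1)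
  termination_by n
  decreasing_by
    exact Nat.div_lt_self (Nat.pos_of_ne_zero (by omega)) (by omega)

-- A's loop, mathematically: peel off the largest power b^(log_b n)
def peelSpec (b : Nat) (n : Nat) : List Int :=
  if _h : n = 0 ∨ b ≤ 1 then []
  else (Nat.log b n : Int) :: peelSpec b (n - b ^ Nat.log b n)
  termination_by n
  decreasing_by
    have : 0 < b ^ Nat.log b n := Nat.pow_pos (by omega)
    omega

theorem digitSpec_zero (b : Nat) (ord : Int) : digitSpec b 0 ord = [] := by
  rw [digitSpec]; simp

theorem digitSpec_unfold (b n : Nat) (ord : Int) (hb : 2 ≤ b) :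
    digitSpec b n ord = List.replicate (n % b) ord ++ digitSpec b (n / b) (ord + 1) := by
  by_cases h : n = 0
  · subst h; simp [digitSpec_zero]
  · rw [digitSpec]; simp only [dif_neg (by omega : ¬ (n = 0 ∨ b ≤ 1))]

-- peel off the top power inside digitSpec
theorem digitSpec_peel (b : Nat) (hb : 2 ≤ b) :
    ∀ (k n : Nat) (ord : Int), b ^ k ≤ n → n < b ^ (k + 1) →
      digitSpec b n ord = digitSpec b (n - b ^ k) ord ++ [ord + (k : Int)] := by
  intro k
  induction k with
  | zero =>
      intro n ord h1 h2
      rw [pow_zero] at h1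
      rw [zero_add, pow_one] at h2
      obtain ⟨m, rfl⟩ : ∃ m, n = m + 1 := ⟨n - 1, by omega⟩
      rw [digitSpec_unfold b (m + 1) ord hb]
      rw [Nat.mod_eq_of_lt h2, Nat.div_eq_of_lt h2, digitSpec_zero]
      simp only [pow_zero, Nat.add_sub_cancel, Nat.cast_zero, add_zero, List.append_nil]
      rw [digitSpec_unfold b m ord hb,
        Nat.mod_eq_of_lt (by omega), Nat.div_eq_of_lt (by omega), digitSpec_zero]
      simp [List.replicate_succ']
  | succ k ih =>
      intro n ord h1 h2
      have hbpos : 0 < b := by omega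
      have hps : b ^ (k + 1) = b ^ k * b := pow_succ b k
      have hpss : b ^ (k + 1 + 1) = b ^ (k + 1) * b := pow_succ b (k + 1)
      have ht : n = (n - b ^ (k + 1)) + b ^ k * b := by omega
      have hmod : n % b = (n - b ^ (k + 1)) % b := by
        conv_lhs => rw [ht]
        rw [Nat.add_mul_mod_self_right]
      have hdiv : n / b = (n - b ^ (k + 1)) / b + b ^ k := by
        conv_lhs => rw [ht]
        rw [Nat.add_mul_div_right _ _ hbpos]
      have hle : b ^ k ≤ n / b := (Nat.le_div_iff_mul_le hbpos).2 (by omega)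
      have hlt : n / b < b ^ (k + 1) := (Nat.div_lt_iff_lt_mul hbpos).2 (by omega)
      rw [digitSpec_unfold b n ord hb, ih (n / b) (ord + 1) hle hlt,
        digitSpec_unfold b (n - b ^ (k + 1)) ord hb, hmod,
        show n / b - b ^ k = (n - b ^ (k + 1)) / b by omega]
      simp only [List.append_assoc]
      congr 2
      simp only [List.cons.injEq, and_true]
      push_cast
      ring

-- peelSpec reversed is digitSpec
theorem peelSpec_reverse (b : Nat) (hb : 2 ≤ b) :
    ∀ n, (peelSpec b n).reverse = digitSpec b n 0 := by
  intro n
  induction n using Nat.strong_induction_on with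
  | _ n ih =>
    by_cases h : n = 0
    · subst h; rw [peelSpec, digitSpec_zero]; simp
    · have hpow := Nat.pow_log_le_self b h
      have hlt := Nat.lt_pow_succ_log_self (show 1 < b by omega) n
      have hppos : 0 < b ^ Nat.log b n := Nat.pow_pos (by omega)
      rw [peelSpec, dif_neg (by omega : ¬ (n = 0 ∨ b ≤ 1))]
      rw [List.reverse_cons, ih (n - b ^ Nat.log b n) (by omega),
        digitSpec_peel b hb (Nat.log b n) n 0 hpow hlt]
      simp

-- casts between the Int-level loops and the Nat-level specs
theorem toNat_cast_ops (n b : Int) (hn : 0 < n) (hb : 2 ≤ b) :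
    (PySem.Int.floordiv n b).toNat = n.toNat / b.toNat ∧
    (PySem.Int.mod n b).toNat = n.toNat % b.toNat := by
  have hnn : n = ((n.toNat : Nat) : Int) := (Int.toNat_of_nonneg (by omega)).symm
  have hbb : b = ((b.toNat : Nat) : Int) := (Int.toNat_of_nonneg (by omega)).symm
  have h1 : PySem.Int.floordiv n b = ((n.toNat / b.toNat : Nat) : Int) := by
    conv_lhs => rw [hnn, hbb]
    exact PySem.Int.floordiv_natCast _ _
  have h2 : PySem.Int.mod n b = ((n.toNat % b.toNat : Nat) : Int) := by
    conv_lhs => rw [hnn, hbb]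
    exact PySem.Int.mod_natCast _ _
  refine ⟨?_, ?_⟩
  · rw [h1]; exact Int.toNat_natCast _
  · rw [h2]; exact Int.toNat_natCast _

-- B's fuel loop computes digitSpec
theorem altLoop_eq (b : Int) (hb : 2 ≤ b) :
    ∀ (fuel : Nat) (n ord : Int) (out : List Int), n.toNat ≤ fuel →
      altLoop b fuel n ord out = out ++ digitSpec b.toNat n.toNat ord := by
  intro fuel
  induction fuel with
  | zero =>
      intro n ord out hf
      have : n.toNat = 0 := by omega
      rw [this, digitSpec_zero]
      simp [altLoop]
  | succ f ih =>
      intro n ord out hf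
      by_cases hn : n > 0
      · have hbn : 2 ≤ b.toNat := by omega
        have h1 : 1 ≤ n.toNat := by omega
        obtain ⟨hq, hd⟩ := toNat_cast_ops n b hn hb
        have hq0 : 0 ≤ PySem.Int.floordiv n b := by
          rw [PySem.Int.floordiv_eq_ediv_of_pos (by omega)]
          exact Int.ediv_nonneg (by omega) (by omega)
        have hqlt : (PySem.Int.floordiv n b).toNat ≤ f := by
          rw [hq]
          have := Nat.div_lt_self (by omega : 0 < n.toNat) (by omega : 1 < b.toNat)
          omega
        simp only [altLoop, if_pos hn]
        rw [ih _ _ _ hqlt, hq, hd, digitSpec_unfold b.toNat n.toNat ord hbn]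
        simp
      · have : n.toNat = 0 := by omega
        simp only [altLoop, if_neg hn]
        rw [this, digitSpec_zero]
        simp

-- the inner loop condition: n % b^(j+1) ≠ n exactly when b^(j+1) ≤ n
theorem inner_cond (n b : Int) (hn : 0 < n) (hb : 2 ≤ b) (j : Nat) :
    (PySem.Int.mod n (b ^ (j + 1)) ≠ n) ↔ b.toNat ^ (j + 1) ≤ n.toNat := by
  have hp : (0:Int) < b ^ (j + 1) := pow_pos (by omega) _
  have hcast : (b:Int) ^ (j + 1) = ((b.toNat ^ (j + 1) : Nat) : Int) := by
    rw [Nat.cast_pow, Int.toNat_of_nonneg (show (0:Int) ≤ b by omega)]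
  rw [PySem.Int.mod_eq_emod_of_pos hp]
  constructor
  · intro hne
    by_contra hle
    exact hne (Int.emod_eq_of_lt (by omega) (by omega))
  · intro hle
    have h1 := Int.emod_lt_of_pos n hp
    omega

-- inner loop finds Nat.log
theorem ordersInner_eq (n b : Int) (hb : 2 ≤ b) (hn : 0 < n) :
    ∀ (fuel ord : Nat), ord ≤ Nat.log b.toNat n.toNat →
      Nat.log b.toNat n.toNat - ord ≤ fuel →
      ordersInner n b fuel ord = Nat.log b.toNat n.toNat := by
  intro fuel
  induction fuel with
  | zero =>
      intro ord h1 h2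
      have : ord = Nat.log b.toNat n.toNat := by omega
      simp [ordersInner, this]
  | succ f ih =>
      intro ord h1 h2
      have hiff : b.toNat ^ (ord + 1) ≤ n.toNat ↔ ord + 1 ≤ Nat.log b.toNat n.toNat :=
        (Nat.le_log_iff_pow_le (by omega) (by omega)).symm
      by_cases hc : ord = Nat.log b.toNat n.toNat
      · have : ¬ (PySem.Int.mod n (b ^ (ord + 1)) ≠ n) := by
          rw [inner_cond n b hn hb ord, hiff]; omega
        subst hc
        simp only [ordersInner, if_neg this]
      · have : PySem.Int.mod n (b ^ (ord + 1)) ≠ n := by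
          rw [inner_cond n b hn hb ord, hiff]; omega
        simp only [ordersInner, if_pos this]
        exact ih (ord + 1) (by omega) (by omega)

-- outer loop computes peelSpec
theorem ordersOuter_eq (b : Int) (hb : 2 ≤ b) :
    ∀ (fuel : Nat) (n : Int) (acc : List Int), n.toNat ≤ fuel →
      ordersOuter b fuel n acc = acc ++ peelSpec b.toNat n.toNat := by
  intro fuel
  induction fuel with
  | zero =>
      intro n acc hf
      have : n.toNat = 0 := by omega
      rw [this, peelSpec]
      simp [ordersOuter]
  | succ f ih =>
      intro n acc hf
      by_cases hn : n > 0
      · have hbn : 2 ≤ b.toNat := by omega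
        have hnz : n.toNat ≠ 0 := by omega
        have hK := ordersInner_eq n b hb hn n.toNat 0 (Nat.zero_le _)
          (by simpa using Nat.log_le_self b.toNat n.toNat)
        set K := Nat.log b.toNat n.toNat with hKdef
        have hpow : b.toNat ^ K ≤ n.toNat := Nat.pow_log_le_self b.toNat hnz
        have hppos : 0 < b.toNat ^ K := Nat.pow_pos (by omega)
        have hcast : (b:Int) ^ K = ((b.toNat ^ K : Nat) : Int) := by
          rw [Nat.cast_pow, Int.toNat_of_nonneg (show (0:Int) ≤ b by omega)]
        have hsub : (n - b ^ K).toNat = n.toNat - b.toNat ^ K := by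
          rw [hcast]; omega
        have hfl : (n - b ^ K).toNat ≤ f := by rw [hsub]; omega
        simp only [ordersOuter, if_pos hn, hK]
        rw [ih _ _ hfl, hsub]
        conv_rhs => rw [peelSpec, dif_neg (by omega : ¬ (n.toNat = 0 ∨ b.toNat ≤ 1))]
        simp [← hKdef]
      · have : n.toNat = 0 := by omega
        simp only [ordersOuter, if_neg hn]
        rw [this, peelSpec]
        simp

-- ===== VERDICT (by name: the statement is the Claim_ definition above) =====
theorem orders_for_n_spec : Claim_equal_orders_for_n := by
  intro n b _ hpre
  unfold Spec_orders_for_n orders_for_n orders_for_n_alt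
  by_cases hn : n ≤ 0
  · have : n.toNat = 0 := by omega
    rw [this]; rfl
  · have hb : 2 ≤ b := by rcases hpre with h | h; omega; exact h
    rw [ordersOuter_eq b hb n.toNat n [] le_rfl,
      altLoop_eq b hb n.toNat n 0 [] le_rfl]
    simpa using peelSpec_reverse b.toNat (by omega) n.toNat
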